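-- pv_equiv track=rewrite | github.com/kirillfr97/Custom-Encoding-and-Deconding | custom_codec.py | _substitution
-- ===== SOURCE A (Python) =====
-- def _substitution(string: str) -> str:
--     """
--     Replace all vowels (a, e, i, o, u) with their ASCII values.
--     Replace all consonants with the next letter in the alphabet (e.g., b becomes c, z becomes a).
--     """
--     if string.isnumeric():
--         return string
--
--     encoded_string = ""
--     for char in string:
--         if char in "aeiouAEIOU":
--             encoded_string += str(ord(char))
--         elif char.isalpha():
--             next_char = chr(ord(char) + 1) if char not in "zZ" else chr(ord(char) - 25)
--             encoded_string += next_char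
--         else:
--             encoded_string += char
--     return encoded_string
-- ===== SOURCE B (Python) =====
-- def _substitution(string: str) -> str:
--     """
--     Replace all vowels (a, e, i, o, u) with their ASCII values.
--     Replace all consonants with the next letter in the alphabet (e.g., b becomes c, z becomes a).
--     """
--     if string.isnumeric():
--         return string
--
--     vowels = "aeiouAEIOU"
--     table = {}
--     for base in ("abcdefghijklmnopqrstuvwxyz", "ABCDEFGHIJKLMNOPQRSTUVWXYZ"):
--         for i, ch in enumerate(base):
--             table[ch] = str(ord(ch)) if ch in vowels else base[(i + 1) % 26]
--     return string.translate(str.maketrans(table))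
-- ===== Notes on version B (the rewrite author's own statement) =====
-- stated objective: idiomatic
-- what changed: Replaces A's per-character if/elif chain and string concatenation inside the loop by a translation table built once over the 52 ASCII letters (vowel -> its code as a string, consonant -> successor letter via (i+1)%26) and a single str.translate pass.
import Mathlib
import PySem

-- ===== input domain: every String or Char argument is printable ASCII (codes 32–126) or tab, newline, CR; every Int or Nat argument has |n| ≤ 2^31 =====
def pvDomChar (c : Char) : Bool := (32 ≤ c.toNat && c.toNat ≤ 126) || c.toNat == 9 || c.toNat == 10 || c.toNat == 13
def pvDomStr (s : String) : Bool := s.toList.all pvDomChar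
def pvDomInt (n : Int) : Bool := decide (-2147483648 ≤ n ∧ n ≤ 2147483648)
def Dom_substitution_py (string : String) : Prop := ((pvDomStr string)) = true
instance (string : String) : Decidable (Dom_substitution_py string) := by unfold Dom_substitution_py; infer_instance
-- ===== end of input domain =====

-- B replaces A's per-character branch chain by a translation table built once and one
-- table-driven pass (str.translate); same result, idiomatic restructuring.

-- str.isnumeric() ported by hand as "nonempty and all chars are digits": exact on the
-- printable-ASCII domain (both Pythons call the same builtin, so both ports share it).
def pyIsNumeric (s : String) : Bool := !s.toList.isEmpty && s.toList.all PySem.Chars.isdigit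

-- ===== PORT A =====
def subACh (acc : List Char) (c : Char) : List Char :=
  if c ∈ "aeiouAEIOU".toList then acc ++ (PySem.Int.toStr (c.toNat : Int)).toList
  else if PySem.Chars.isalpha c then
    acc ++ [if c ∉ ['z', 'Z'] then Char.ofNat (c.toNat + 1) else Char.ofNat (c.toNat - 25)]
  else acc ++ [c]

def substitution_py (string : String) : String :=
  if pyIsNumeric string then string
  else String.ofList (string.toList.foldl subACh [])

-- ===== PORT B =====
-- the translation table: for each ASCII letter, vowel ↦ str(ord(letter)), consonant ↦ next letter
def altTable : PySem.Dict Char String :=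
  [("abcdefghijklmnopqrstuvwxyz".toList), ("ABCDEFGHIJKLMNOPQRSTUVWXYZ".toList)].foldl
    (fun d base =>
      (PySem.List.enumerate base 0).foldl
        (fun d p =>
          d.insert p.2
            (if p.2 ∈ "aeiouAEIOU".toList then PySem.Int.toStr (p.2.toNat : Int)
             else String.ofList [PySem.List.pyGetD base (PySem.Int.mod (p.1 + 1) 26) ' ']))
        d)
    PySem.Dict.empty

-- str.translate: one pass, each char replaced by its table entry, absent chars unchanged
def substitution_py_alt (string : String) : String :=
  if pyIsNumeric string then string
  else String.ofList ((string.toList.map (fun c => (altTable.getD c (String.ofList [c])).toList)).flatten)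

-- ===== PRECONDITION & SPEC =====
def Spec_substitution_py (string : String) (out : String) : Prop := out = substitution_py_alt string
instance (string : String) (out : String) : Decidable (Spec_substitution_py string out) := by unfold Spec_substitution_py; infer_instance

-- ===== CLAIM (what is proved, stated in full; the proofs are below) =====
def Claim_equal_substitution_py : Prop := ∀ (string : String), Dom_substitution_py string → Spec_substitution_py string (substitution_py string)

-- ===== LEMMAS AND PROOFS =====

-- the chunk A's loop appends for one character
def chunkA (c : Char) : List Char :=
  if c ∈ "aeiouAEIOU".toList then (PySem.Int.toStr (c.toNat : Int)).toList
  else if PySem.Chars.isalpha c then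
    [if c ∉ ['z', 'Z'] then Char.ofNat (c.toNat + 1) else Char.ofNat (c.toNat - 25)]
  else [c]

-- the chunk B's translate pass emits for one character
def chunkB (c : Char) : List Char := (altTable.getD c (String.ofList [c])).toList

lemma subACh_eq_append : subACh = fun acc c => acc ++ chunkA c := by
  funext acc c
  simp only [subACh, chunkA]
  split_ifs <;> rfl

set_option maxRecDepth 10000 in
lemma chunk_all :
    ((List.range 127).all fun n => chunkA (Char.ofNat n) == chunkB (Char.ofNat n)) = true := by
  decide

lemma chunk_eq_of_dom (c : Char) (h : pvDomChar c = true) : chunkA c = chunkB c := by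
  have hlt : c.toNat < 127 := by
    simp only [pvDomChar, Bool.or_eq_true, Bool.and_eq_true, decide_eq_true_eq, beq_iff_eq] at h
    omega
  have := List.all_eq_true.mp chunk_all c.toNat (List.mem_range.mpr hlt)
  have h2 := eq_of_beq this
  rwa [Char.ofNat_toNat] at h2

theorem substitution_py_spec : Claim_equal_substitution_py := by
  intro s hdom
  unfold Spec_substitution_py substitution_py substitution_py_alt
  by_cases hnum : pyIsNumeric s = true
  · simp [hnum]
  · simp only [hnum]
    apply congrArg String.ofList
    rw [subACh_eq_append, PySem.List.foldl_append_eq_flatMap, List.nil_append,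
        ← List.flatMap_def]
    have hall : ∀ c ∈ s.toList, chunkA c = chunkB c := by
      intro c hc
      exact chunk_eq_of_dom c (List.all_eq_true.mp hdom c hc)
    show s.toList.flatMap chunkA = s.toList.flatMap chunkB
    simp only [List.flatMap]
    exact congrArg List.flatten (List.map_congr_left hall)
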